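-- pv_equiv track=rewrite | github.com/tdw419/geometry_os | systems/visual_shell/swarm/visual_perception/visual_perception_agent.py | _detect_change
-- ===== SOURCE A (Python) =====
-- from typing import Dict, Any, Optional
--
-- def _detect_change(old_state: Optional[Dict], new_state: Dict) -> bool:
--     """Detect meaningful semantic changes between two states."""
--     if old_state is None:
--         return True
--
--     # Compare widget counts
--     if len(old_state.get("widgets", [])) != len(new_state.get("widgets", [])):
--         return True
--
--     # Deep compare widgets (simplified)
--     # In production, use a more robust diffing (e.g., text content, widget types)
--     # Avoiding direct JSON string compare to handle ordering/metadata noise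
--
--     old_widgets = sorted([w.get("text", "") for w in old_state.get("widgets", [])])
--     new_widgets = sorted([w.get("text", "") for w in new_state.get("widgets", [])])
--
--     return old_widgets != new_widgets
-- ===== SOURCE B (Python) =====
-- from collections import Counter
-- from typing import Dict, Optional
--
-- def _detect_change(old_state: Optional[Dict], new_state: Dict) -> bool:
--     """Detect meaningful semantic changes between two states."""
--     if old_state is None:
--         return True
--     old_texts = Counter(w.get("text", "") for w in old_state.get("widgets", []))
--     new_texts = Counter(w.get("text", "") for w in new_state.get("widgets", []))
--     return old_texts != new_texts
-- ===== Notes on version B (the rewrite author's own statement) =====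
-- stated objective: simpler
-- what changed: Replaces the separate length pre-check plus two sorts with a single multiset (Counter) comparison of the widget texts; the length check is dropped because differing counts already make the Counters differ.
import Mathlib
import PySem

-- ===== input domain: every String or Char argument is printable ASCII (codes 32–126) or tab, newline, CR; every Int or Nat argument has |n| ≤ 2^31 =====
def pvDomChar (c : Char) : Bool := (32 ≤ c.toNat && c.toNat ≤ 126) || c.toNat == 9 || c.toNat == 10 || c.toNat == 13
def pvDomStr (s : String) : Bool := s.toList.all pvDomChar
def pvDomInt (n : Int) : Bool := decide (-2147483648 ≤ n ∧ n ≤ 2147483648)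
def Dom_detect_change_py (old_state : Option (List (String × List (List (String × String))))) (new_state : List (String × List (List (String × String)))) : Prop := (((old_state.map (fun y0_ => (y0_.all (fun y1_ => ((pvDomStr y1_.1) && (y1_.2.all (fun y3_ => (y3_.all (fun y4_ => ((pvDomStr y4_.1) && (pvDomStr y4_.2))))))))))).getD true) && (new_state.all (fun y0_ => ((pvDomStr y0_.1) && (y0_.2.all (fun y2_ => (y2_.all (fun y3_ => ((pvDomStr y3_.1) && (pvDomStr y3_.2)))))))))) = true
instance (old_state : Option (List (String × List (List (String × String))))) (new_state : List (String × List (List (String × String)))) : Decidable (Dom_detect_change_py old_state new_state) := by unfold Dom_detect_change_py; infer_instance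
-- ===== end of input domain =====

-- ===== PORT A =====
-- B replaces the length pre-check + two sorts with one Counter (multiset) comparison: simpler, one pass.
-- texts st = [w.get("text","") for w in st.get("widgets", [])]
def pvTexts (st : List (String × List (List (String × String)))) : List String :=
  (PySem.Dict.getD (PySem.Dict.mk st) "widgets" []).map
    (fun w => PySem.Dict.getD (PySem.Dict.mk w) "text" "")

def detect_change_py (old_state : Option (List (String × List (List (String × String))))) (new_state : List (String × List (List (String × String)))) : Bool :=
  match old_state with
  | none => true
  | some o =>
    if (PySem.Dict.getD (PySem.Dict.mk o) "widgets" []).length ≠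
       (PySem.Dict.getD (PySem.Dict.mk new_state) "widgets" []).length then true
    else
      let old_widgets := PySem.List.sorted (pvTexts o) (fun x => x) false
      let new_widgets := PySem.List.sorted (pvTexts new_state) (fun x => x) false
      decide (old_widgets ≠ new_widgets)

-- ===== PORT B =====
-- Counter(old texts) != Counter(new texts); Python dict/Counter equality compares keys as a set
-- and the count at each key (ported as the two-directional getD check, exact since counts are positive).
def detect_change_py_alt (old_state : Option (List (String × List (List (String × String))))) (new_state : List (String × List (List (String × String)))) : Bool :=
  match old_state with
  | none => true
  | some o =>
    let old_texts := PySem.Dict.counter (pvTexts o)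
    let new_texts := PySem.Dict.counter (pvTexts new_state)
    !(old_texts.keys.all (fun k => new_texts.getD k 0 == old_texts.getD k 0) &&
      new_texts.keys.all (fun k => old_texts.getD k 0 == new_texts.getD k 0))

-- ===== PRECONDITION & SPEC =====
def Spec_detect_change_py (old_state : Option (List (String × List (List (String × String))))) (new_state : List (String × List (List (String × String)))) (out : Bool) : Prop := out = detect_change_py_alt old_state new_state
instance (old_state : Option (List (String × List (List (String × String))))) (new_state : List (String × List (List (String × String)))) (out : Bool) : Decidable (Spec_detect_change_py old_state new_state out) := by unfold Spec_detect_change_py; infer_instance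

-- ===== CLAIM (what is proved, stated in full; the proofs are below) =====
def Claim_equal_detect_change_py : Prop := ∀ (old_state : Option (List (String × List (List (String × String))))) (new_state : List (String × List (List (String × String)))), Dom_detect_change_py old_state new_state → Spec_detect_change_py old_state new_state (detect_change_py old_state new_state)

-- ===== LEMMAS AND PROOFS =====

-- B's Counter-equality check succeeds exactly when the two text lists are permutations.
lemma counterCheck_iff (xs ys : List String) :
    (((PySem.Dict.counter xs).keys.all (fun k => (PySem.Dict.counter ys).getD k 0 == (PySem.Dict.counter xs).getD k 0)) &&
     ((PySem.Dict.counter ys).keys.all (fun k => (PySem.Dict.counter xs).getD k 0 == (PySem.Dict.counter ys).getD k 0))) = true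
    ↔ xs.Perm ys := by
  simp only [Bool.and_eq_true, List.all_eq_true, PySem.Dict.keys_counter,
    PySem.Dict.getD_counter, beq_iff_eq, PySem.Set.mem_ofList, List.perm_iff_count]
  constructor
  · rintro ⟨h1, h2⟩ v
    by_cases hx : v ∈ xs
    · exact_mod_cast (h1 v hx).symm
    · by_cases hy : v ∈ ys
      · exact_mod_cast h2 v hy
      · simp [List.count_eq_zero_of_not_mem hx, List.count_eq_zero_of_not_mem hy]
  · intro h
    exact ⟨fun v _ => by exact_mod_cast (h v).symm, fun v _ => by exact_mod_cast h v⟩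

-- ===== VERDICT (by name: the statement is the Claim_ definition above) =====
theorem detect_change_py_spec : Claim_equal_detect_change_py := by
  intro old_state new_state _
  unfold Spec_detect_change_py detect_change_py detect_change_py_alt
  cases old_state with
  | none => rfl
  | some o =>
    simp only []
    by_cases hperm : (pvTexts o).Perm (pvTexts new_state)
    · have hlen : (PySem.Dict.getD (PySem.Dict.mk o) "widgets" []).length =
          (PySem.Dict.getD (PySem.Dict.mk new_state) "widgets" []).length := by
        have := hperm.length_eq
        simpa [pvTexts] using this
      have hsort : PySem.List.sorted (pvTexts o) (fun x => x) false =
          PySem.List.sorted (pvTexts new_state) (fun x => x) false :=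
        (PySem.List.sorted_id_eq_sorted_id_iff_perm _ _).mpr hperm
      have hchk := (counterCheck_iff (pvTexts o) (pvTexts new_state)).mpr hperm
      rw [if_neg (by simp [hlen])]
      rw [hchk, hsort]
      simp
    · have hchk : (((PySem.Dict.counter (pvTexts o)).keys.all (fun k => (PySem.Dict.counter (pvTexts new_state)).getD k 0 == (PySem.Dict.counter (pvTexts o)).getD k 0)) &&
          ((PySem.Dict.counter (pvTexts new_state)).keys.all (fun k => (PySem.Dict.counter (pvTexts o)).getD k 0 == (PySem.Dict.counter (pvTexts new_state)).getD k 0))) = false := by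
        by_contra h
        exact hperm ((counterCheck_iff _ _).mp (Bool.of_not_eq_false h))
      by_cases hlen : (PySem.Dict.getD (PySem.Dict.mk o) "widgets" []).length =
          (PySem.Dict.getD (PySem.Dict.mk new_state) "widgets" []).length
      · have hsort : PySem.List.sorted (pvTexts o) (fun x => x) false ≠
            PySem.List.sorted (pvTexts new_state) (fun x => x) false :=
          fun h => hperm ((PySem.List.sorted_id_eq_sorted_id_iff_perm _ _).mp h)
        rw [if_neg (by simp [hlen])]
        rw [hchk]
        simp [hsort]
      · rw [if_pos (by simp [hlen]), hchk]
        rfl
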